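-- pv_equiv track=rewrite | github.com/obstinaat/aoc23_rust | day3/src/main.py | find_numbers_in_line
-- ===== SOURCE A (Python) =====
-- def find_numbers_in_line(line):
--     numbers = []
--     positions = []
--     for i in range(len(line)):
--         if line[i].isdigit():
--             num = int(line[i])
--             if i == 0:
--                 numbers.append(num)
--                 positions.append([i])
--
--             #adjacent case
--             if i > 0 and line[i-1].isdigit():
--                 numbers[-1] = numbers[-1] * 10 + num
--                 positions[-1].append(i)
--
--             if i > 0 and not line[i-1].isdigit():
--                 numbers.append(num)
--                 positions.append([i])
--                 pow = 0
--
--     return numbers, positions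
-- ===== SOURCE B (Python) =====
-- def find_numbers_in_line(line):
--     numbers = []
--     positions = []
--     i = 0
--     n = len(line)
--     while i < n:
--         if line[i].isdigit():
--             j = i
--             value = 0
--             while j < n and line[j].isdigit():
--                 value = value * 10 + int(line[j])
--                 j += 1
--             numbers.append(value)
--             positions.append(list(range(i, j)))
--             i = j
--         else:
--             i += 1
--     return numbers, positions
-- ===== Notes on version B (the rewrite author's own statement) =====
-- stated objective: simpler
-- what changed: B segments the line into maximal digit runs with an explicit run scanner and appends each completed number/position-run once, instead of A's per-index loop that looks back one character and mutates the last list entries in place.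
import Mathlib
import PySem

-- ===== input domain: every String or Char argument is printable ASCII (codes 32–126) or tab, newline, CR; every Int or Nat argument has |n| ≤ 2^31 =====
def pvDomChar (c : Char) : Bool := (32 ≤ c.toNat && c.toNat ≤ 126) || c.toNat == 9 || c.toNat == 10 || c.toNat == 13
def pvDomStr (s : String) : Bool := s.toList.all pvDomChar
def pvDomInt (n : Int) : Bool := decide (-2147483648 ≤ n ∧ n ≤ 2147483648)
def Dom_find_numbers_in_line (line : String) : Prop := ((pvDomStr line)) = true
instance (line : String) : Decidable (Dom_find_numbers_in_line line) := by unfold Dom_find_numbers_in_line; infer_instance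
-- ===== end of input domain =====

-- B replaces A's per-index lookback loop (which mutates the last list entries) by explicit
-- segmentation into maximal digit runs, appending each completed number/positions pair once
-- (objective: simpler; same O(n) cost; return value only, no argument is mutated by either).

-- ===== PORT A =====
-- one iteration of A's 'for i in range(len(line))' body; st = (numbers, positions)
def pvStepA (l : List Char) (st : List Int × List (List Int)) (i : Int) :
    List Int × List (List Int) :=
  if PySem.Chars.isdigit (PySem.List.pyGetD l i ' ') then       -- line[i].isdigit()
    let num := (PySem.Int.ofChars? [PySem.List.pyGetD l i ' ']).getD 0   -- num = int(line[i])
    let st1 := if i = 0 then (st.1 ++ [num], st.2 ++ [[i]]) else st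
    -- adjacent case: numbers[-1] = numbers[-1]*10 + num; positions[-1].append(i)
    let st2 := if 0 < i ∧ PySem.Chars.isdigit (PySem.List.pyGetD l (i - 1) ' ') then
        (st1.1.dropLast ++ [st1.1.getLastD 0 * 10 + num],
         st1.2.dropLast ++ [st1.2.getLastD [] ++ [i]])
      else st1
    if 0 < i ∧ ¬ PySem.Chars.isdigit (PySem.List.pyGetD l (i - 1) ' ') then
      (st2.1 ++ [num], st2.2 ++ [[i]])
    else st2
  else st

def find_numbers_in_line (line : String) : List Int × List (List Int) :=
  let l := line.toList
  (PySem.List.pyRange 0 (l.length : Int) 1).foldl (pvStepA l) ([], [])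

-- ===== PORT B =====
-- B's outer while loop: at a digit, scan the maximal digit run (B's inner while = takeWhile,
-- folding the run's digit values), emit (value, list(range(i, j))), resume after the run.
def pvGoB : List Char → Int → List Int × List (List Int)
  | [], _ => ([], [])
  | c :: cs, i =>
    if h : PySem.Chars.isdigit c then
      let run := (c :: cs).takeWhile PySem.Chars.isdigit
      let rest := (c :: cs).dropWhile PySem.Chars.isdigit
      let v := run.foldl (fun a d => a * 10 + (PySem.Int.ofChars? [d]).getD 0) 0
      let r := pvGoB rest (i + run.length)
      (v :: r.1, PySem.List.pyRange i (i + run.length) 1 :: r.2)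
    else pvGoB cs (i + 1)
termination_by cs _ => cs.length
decreasing_by
  · simp only [List.dropWhile, h, List.length_cons]
    have := List.length_dropWhile_le PySem.Chars.isdigit cs
    omega
  · simp

def find_numbers_in_line_alt (line : String) : List Int × List (List Int) :=
  pvGoB line.toList 0

-- ===== PRECONDITION & SPEC =====
def Spec_find_numbers_in_line (line : String) (out : List Int × List (List Int)) : Prop := out = find_numbers_in_line_alt line
instance (line : String) (out : List Int × List (List Int)) : Decidable (Spec_find_numbers_in_line line out) := by unfold Spec_find_numbers_in_line; infer_instance

-- ===== CLAIM (what is proved, stated in full; the proofs are below) =====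
def Claim_equal_find_numbers_in_line : Prop := ∀ (line : String), Dom_find_numbers_in_line line → Spec_find_numbers_in_line line (find_numbers_in_line line)

-- ===== LEMMAS AND PROOFS =====

lemma pvMain (l : List Char) : ∀ (m k : Nat), l.length - k = m → k ≤ l.length →
    ((k = 0 ∨ PySem.Chars.isdigit (l.getD (k-1) ' ') = false) →
      ∀ ns ps, (PySem.List.pyRange (k:Int) (l.length:Int) 1).foldl (pvStepA l) (ns, ps)
        = (ns ++ (pvGoB (l.drop k) (k:Int)).1, ps ++ (pvGoB (l.drop k) (k:Int)).2))
    ∧ (0 < k → PySem.Chars.isdigit (l.getD (k-1) ' ') = true →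
      ∀ ns ps v q,
        (PySem.List.pyRange (k:Int) (l.length:Int) 1).foldl (pvStepA l) (ns ++ [v], ps ++ [q])
        = (ns ++ [((l.drop k).takeWhile PySem.Chars.isdigit).foldl
              (fun a d => a * 10 + (PySem.Int.ofChars? [d]).getD 0) v]
              ++ (pvGoB ((l.drop k).dropWhile PySem.Chars.isdigit)
                    ((k:Int) + ((l.drop k).takeWhile PySem.Chars.isdigit).length)).1,
           ps ++ [q ++ PySem.List.pyRange (k:Int)
                    ((k:Int) + ((l.drop k).takeWhile PySem.Chars.isdigit).length) 1]
              ++ (pvGoB ((l.drop k).dropWhile PySem.Chars.isdigit)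
                    ((k:Int) + ((l.drop k).takeWhile PySem.Chars.isdigit).length)).2)) := by
  intro m
  induction m with
  | zero =>
    intro k hm hk
    have hkn : k = l.length := by omega
    subst hkn
    constructor
    · intro _ ns ps
      simp [PySem.List.pyRange, pvGoB]
    · intro _ _ ns ps v q
      simp [PySem.List.pyRange, pvGoB]
  | succ m ih =>
    intro k hm hk
    have hklt : k < l.length := by omega
    have hdrop : l.drop k = l[k] :: l.drop (k+1) := List.drop_eq_getElem_cons hklt
    have hrange : PySem.List.pyRange (k:Int) (l.length:Int) 1
        = (k:Int) :: PySem.List.pyRange ((k+1:Nat):Int) (l.length:Int) 1 := by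
      have := PySem.List.pyRange_one_cons (a := (k:Int)) (b := (l.length:Int))
        (by exact_mod_cast hklt)
      push_cast
      push_cast at this
      exact this
    have hget : PySem.List.pyGetD l (k:Int) ' ' = l[k] := by
      rw [PySem.List.pyGetD_natCast]
      exact List.getD_eq_getElem l ' ' hklt
    have ihn := ih (k+1) (by omega) (by omega)
    have hprevk : l.getD k ' ' = l[k] := List.getD_eq_getElem l ' ' hklt
    push_cast at hrange ihn
    by_cases hdig : PySem.Chars.isdigit l[k] = true
    · -- current char is a digit
      constructor
      · intro hprev ns ps
        rw [hrange, List.foldl_cons]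
        have hstep : pvStepA l (ns, ps) (k:Int)
            = (ns ++ [(PySem.Int.ofChars? [l[k]]).getD 0], ps ++ [[(k:Int)]]) := by
          rcases hprev with h0 | hpf
          · subst h0; simp only [Nat.cast_zero] at hget; simp [pvStepA, hget, hdig]
          · rcases Nat.eq_zero_or_pos k with h0 | hkpos
            · subst h0; simp only [Nat.cast_zero] at hget; simp [pvStepA, hget, hdig]
            · have hc : (k:Int) - 1 = ((k-1:Nat):Int) := by omega
              simp only [List.getD] at hpf
              simp [pvStepA, hget, hdig, hc, PySem.List.pyGetD_natCast, hpf, hkpos.ne']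
        rw [hstep]
        have h2 := ihn.2 (by omega) (by rw [hprevk]; exact hdig) ns ps
          ((PySem.Int.ofChars? [l[k]]).getD 0) [(k:Int)]
        rw [h2]
        have htw : List.takeWhile PySem.Chars.isdigit (List.drop k l)
            = l[k] :: List.takeWhile PySem.Chars.isdigit (List.drop (k+1) l) := by
          rw [hdrop, List.takeWhile_cons_of_pos hdig]
        have hdw : List.dropWhile PySem.Chars.isdigit (List.drop k l)
            = List.dropWhile PySem.Chars.isdigit (List.drop (k+1) l) := by
          rw [hdrop, List.dropWhile_cons_of_pos hdig]
        conv_rhs => rw [hdrop, pvGoB]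
        simp [hdig]
        rw [htw, hdw]
        simp only [List.length_cons, List.foldl_cons]
        push_cast
        ring_nf
        refine ⟨⟨trivial, trivial⟩, ?_, trivial⟩
        conv_rhs => rw [PySem.List.pyRange_one_cons (by omega)]
        ring_nf
      · intro hkpos hpt ns ps v q
        rw [hrange, List.foldl_cons]
        have hc : (k:Int) - 1 = ((k-1:Nat):Int) := by omega
        have hpt' := hpt
        simp only [List.getD] at hpt'
        have hstep : pvStepA l (ns ++ [v], ps ++ [q]) (k:Int)
            = (ns ++ [v * 10 + (PySem.Int.ofChars? [l[k]]).getD 0], ps ++ [q ++ [(k:Int)]]) := by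
          simp [pvStepA, hget, hdig, hc, PySem.List.pyGetD_natCast, hpt', hkpos.ne']
        rw [hstep]
        have h2 := ihn.2 (by omega) (by rw [hprevk]; exact hdig) ns ps
          (v * 10 + (PySem.Int.ofChars? [l[k]]).getD 0) (q ++ [(k:Int)])
        rw [h2]
        have htw : List.takeWhile PySem.Chars.isdigit (List.drop k l)
            = l[k] :: List.takeWhile PySem.Chars.isdigit (List.drop (k+1) l) := by
          rw [hdrop, List.takeWhile_cons_of_pos hdig]
        have hdw : List.dropWhile PySem.Chars.isdigit (List.drop k l)
            = List.dropWhile PySem.Chars.isdigit (List.drop (k+1) l) := by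
          rw [hdrop, List.dropWhile_cons_of_pos hdig]
        rw [htw, hdw]
        simp only [List.length_cons, List.foldl_cons]
        push_cast
        ring_nf
        conv_rhs => rw [PySem.List.pyRange_one_cons (by omega)]
        ring_nf
        simp
    · -- current char is not a digit
      have hdigf : PySem.Chars.isdigit l[k] = false := by simpa using hdig
      constructor
      · intro hprev ns ps
        rw [hrange, List.foldl_cons]
        have hstep : pvStepA l (ns, ps) (k:Int) = (ns, ps) := by
          simp [pvStepA, hget, hdigf]
        rw [hstep]
        have h1 := ihn.1 (Or.inr (by rw [hprevk]; exact hdigf)) ns ps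
        have hgo : pvGoB (List.drop k l) (↑k) = pvGoB (List.drop (k+1) l) ((↑k)+1) := by
          rw [hdrop, pvGoB]
          simp [hdigf]
        rw [h1, hgo]
      · intro hkpos hpt ns ps v q
        rw [hrange, List.foldl_cons]
        have hstep : pvStepA l (ns ++ [v], ps ++ [q]) (k:Int) = (ns ++ [v], ps ++ [q]) := by
          simp [pvStepA, hget, hdigf]
        rw [hstep]
        have h1 := ihn.1 (Or.inr (by rw [hprevk]; exact hdigf)) (ns ++ [v]) (ps ++ [q])
        have hgo : pvGoB (List.drop k l) (↑k) = pvGoB (List.drop (k+1) l) ((↑k)+1) := by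
          rw [hdrop, pvGoB]
          simp [hdigf]
        have htw : (List.drop k l).takeWhile PySem.Chars.isdigit = [] := by
          rw [hdrop, List.takeWhile_cons_of_neg (by simp [hdigf])]
        have hdw : (List.drop k l).dropWhile PySem.Chars.isdigit = List.drop k l := by
          rw [hdrop, List.dropWhile_cons_of_neg (by simp [hdigf])]
        rw [h1, htw, hdw]
        simp [hgo, PySem.List.pyRange]

-- ===== VERDICT (by name: the statement is the Claim_ definition above) =====
theorem find_numbers_in_line_spec : Claim_equal_find_numbers_in_line := by
  unfold Claim_equal_find_numbers_in_line Spec_find_numbers_in_line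
  intro line _
  unfold find_numbers_in_line find_numbers_in_line_alt
  have h := (pvMain line.toList line.toList.length 0 (by omega) (by omega)).1 (Or.inl rfl) [] []
  simpa using h
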